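-- pv_equiv track=rewrite | github.com/mauwie1/TranscriptClassifier | DocxHandler.py | makeNormalTupleList
-- ===== SOURCE A (Python) =====
-- def makeNormalTupleList(textlist):
--     #Makes a list of tuples from a list of text,
--     #The supported format is a docx file with in its first column the speaker,
--     #indicated by 'P' or 'Person' followed by a number and in its second column
--     #the spoken text. This is the standard format.
--     tuplelist = []
--     personOrText = 0
--     element = 0
--     while element <len(textlist):
--         if personOrText == 0:
--             person = returnPersonRegular(textlist[element])
--             if element+1<len(textlist):
--                 tuplelist.append([textlist[element+1],person])
--                 personOrText = 1
--         else:
--              personOrText = 0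
--         element+=1
--     return tuplelist
--
-- def returnPersonRegular(text, startchar=0):
--     #Returns a person like 'P1' or 'Person1' from a textcell
--     counter=startchar
--     if len(text)==0:
--         return 'Empty'
--     while counter <len(text):
--         if text[counter]=='R':
--             break
--         if text[counter].isalpha():
--             return text[counter:]
--         counter+=1
--     return 'Unknown'
-- ===== SOURCE B (Python) =====
-- def makeNormalTupleList(textlist):
--     # Staged passes: take the speaker cells (even positions) and text cells (odd
--     # positions) as two stride slices, resolve all speakers up front, then zip.
--     # A dangling final speaker cell has no text and is dropped by zip.
--     speakers = [returnPersonRegular(cell) for cell in textlist[0::2]]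
--     texts = textlist[1::2]
--     return [[t, p] for t, p in zip(texts, speakers)]
--
-- def returnPersonRegular(text, startchar=0):
--     #Returns a person like 'P1' or 'Person1' from a textcell (shared helper, unchanged)
--     counter=startchar
--     if len(text)==0:
--         return 'Empty'
--     while counter <len(text):
--         if text[counter]=='R':
--             break
--         if text[counter].isalpha():
--             return text[counter:]
--         counter+=1
--     return 'Unknown'
-- ===== Notes on version B (the rewrite author's own statement) =====
-- stated objective: simpler
-- what changed: Replaced A's per-element index walk with a personOrText toggle flag by staged passes: slice the list into speaker cells (textlist[0::2]) and text cells (textlist[1::2]), resolve every speaker with the shared helper in one map, then zip the two lists into the result.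
import Mathlib
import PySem

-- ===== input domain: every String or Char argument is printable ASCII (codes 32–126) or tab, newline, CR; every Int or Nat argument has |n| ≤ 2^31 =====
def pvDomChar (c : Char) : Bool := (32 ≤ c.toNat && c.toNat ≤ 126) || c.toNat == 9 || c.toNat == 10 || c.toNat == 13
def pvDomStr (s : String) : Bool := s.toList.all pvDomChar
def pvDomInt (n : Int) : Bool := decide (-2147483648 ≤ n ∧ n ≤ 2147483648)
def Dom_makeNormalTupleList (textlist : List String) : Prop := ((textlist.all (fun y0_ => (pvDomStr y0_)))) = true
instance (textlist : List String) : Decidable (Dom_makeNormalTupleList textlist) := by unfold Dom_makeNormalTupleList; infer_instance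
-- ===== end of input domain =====

-- B replaces A's index/toggle state machine by staged passes: stride-2 slices for speakers and texts, a map resolving speakers, then a zip; objective: simpler.


-- ===== PORT A =====
-- shared helper returnPersonRegular: the while loop over counter is transliterated as
-- structural recursion over the suffix text[counter:] (counter ↦ drop counter); exact on all inputs.
def returnPersonRegularLoop : List Char → String
  | [] => "Unknown"                                  -- counter reached len(text)
  | c :: rest =>
    if c = 'R' then "Unknown"                        -- break, then fall through to return 'Unknown'
    else if PySem.Chars.isalpha c then String.ofList (c :: rest)   -- return text[counter:]
    else returnPersonRegularLoop rest                -- counter += 1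

def returnPersonRegular (text : String) : String :=
  if PySem.Str.len text = 0 then "Empty"
  else returnPersonRegularLoop text.toList

-- A's while loop: element index, personOrText toggle, accumulator tuplelist.
def mntlLoop (tl : List String) (element : Nat) (personOrText : Nat)
    (acc : List (List String)) : List (List String) :=
  if h : element < tl.length then
    if personOrText = 0 then
      let person := returnPersonRegular tl[element]
      if h2 : element + 1 < tl.length then
        mntlLoop tl (element + 1) 1 (acc ++ [[tl[element + 1], person]])
      else
        mntlLoop tl (element + 1) 0 acc
    else
      mntlLoop tl (element + 1) 0 acc
  else acc
termination_by tl.length - element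

def makeNormalTupleList (textlist : List String) : List (List String) :=
  mntlLoop textlist 0 0 []

-- ===== PORT B =====
-- xs[0::2] ported by hand (PySem.List.slice has no step): strideTwo xs is exactly
-- Python's xs[0::2], and strideTwo xs.tail is exactly xs[1::2].
def strideTwo {α : Type} : List α → List α
  | [] => []
  | [a] => [a]
  | a :: _ :: rest => a :: strideTwo rest

def makeNormalTupleList_alt (textlist : List String) : List (List String) :=
  let speakers := (strideTwo textlist).map returnPersonRegular
  let texts := strideTwo textlist.tail
  List.zipWith (fun t p => [t, p]) texts speakers

-- ===== PRECONDITION & SPEC =====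
def Spec_makeNormalTupleList (textlist : List String) (out : List (List String)) : Prop := out = makeNormalTupleList_alt textlist
instance (textlist : List String) (out : List (List String)) : Decidable (Spec_makeNormalTupleList textlist out) := by unfold Spec_makeNormalTupleList; infer_instance

-- ===== CLAIM (what is proved, stated in full; the proofs are below) =====
def Claim_equal_makeNormalTupleList : Prop := ∀ (textlist : List String), Dom_makeNormalTupleList textlist → Spec_makeNormalTupleList textlist (makeNormalTupleList textlist)

-- ===== LEMMAS AND PROOFS =====
-- proof-side helper: consecutive pairing of the input list
def pairUp {α : Type} : List α → List (α × α)
  | a :: b :: rest => (a, b) :: pairUp rest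
  | _ => []

theorem mntl_loop_eq (tl : List String) (element : Nat) (acc : List (List String)) :
    mntlLoop tl element 0 acc =
      acc ++ (pairUp (tl.drop element)).map (fun pt => [pt.2, returnPersonRegular pt.1]) := by
  rw [mntlLoop]
  by_cases h : element < tl.length
  · simp only [h, dif_pos]
    by_cases h2 : element + 1 < tl.length
    · simp only [h2, dif_pos]
      rw [mntlLoop]
      simp only [h2, dif_pos]
      norm_num
      rw [mntl_loop_eq tl (element + 2) _]
      rw [List.drop_eq_getElem_cons h, List.drop_eq_getElem_cons h2]
      simp [pairUp]
    · simp only [h2, dif_neg, not_false_iff]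
      rw [mntl_loop_eq tl (element + 1) acc]
      rw [List.drop_eq_getElem_cons h]
      have : tl.drop (element + 1) = [] := by
        apply List.drop_eq_nil_of_le; omega
      rw [this]
      simp [pairUp]
  · simp only [h, dif_neg, not_false_iff]
    have : tl.drop element = [] := by apply List.drop_eq_nil_of_le; omega
    simp [this, pairUp]
termination_by tl.length - element
decreasing_by all_goals omega

theorem strideTwo_cons {α : Type} (y : α) (zs : List α) :
    strideTwo (y :: zs) = y :: strideTwo zs.tail := by
  cases zs <;> simp [strideTwo]

theorem zip_strides_eq_pairUp :
    ∀ xs : List String,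
      List.zipWith (fun t p => [t, p]) (strideTwo xs.tail)
        ((strideTwo xs).map returnPersonRegular) =
      (pairUp xs).map (fun pt => [pt.2, returnPersonRegular pt.1])
  | [] => rfl
  | [_] => rfl
  | a :: b :: r => by
    rw [show (a :: b :: r).tail = b :: r from rfl, strideTwo_cons a (b :: r),
        strideTwo_cons b r]
    simp only [List.tail_cons, List.map_cons, List.zipWith_cons_cons, pairUp, List.map]
    exact congrArg _ (zip_strides_eq_pairUp r)

-- ===== VERDICT (by name: the statement is the Claim_ definition above) =====
theorem makeNormalTupleList_spec : Claim_equal_makeNormalTupleList := by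
  intro tl _
  unfold Spec_makeNormalTupleList makeNormalTupleList makeNormalTupleList_alt
  rw [zip_strides_eq_pairUp tl]
  simpa using mntl_loop_eq tl 0 []
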